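-- pv_equiv track=rewrite | github.com/InvalidDavid/Usagi-Bot | cog/autolink.py | _normalize_host
-- ===== SOURCE A (Python) =====
-- def _normalize_host(host: str) -> str:
--     host = host.lower().strip(".")
--     prefixes = ("www.", "m.", "old.", "mobile.")
--     changed = True
--     while changed:
--         changed = False
--         for prefix in prefixes:
--             if host.startswith(prefix):
--                 host = host[len(prefix):]
--                 changed = True
--     return host
-- ===== SOURCE B (Python) =====
-- def _normalize_host(host: str) -> str:
--     labels = host.lower().strip(".").split(".")
--     skip = {"www", "m", "old", "mobile"}
--     while len(labels) > 1 and labels[0] in skip: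
--         labels = labels[1:]
--     return ".".join(labels)
-- ===== Notes on version B (the rewrite author's own statement) =====
-- stated objective: idiomatic
-- what changed: Replaced the repeated restart-the-while-loop prefix stripping over four dotted prefixes by a single left-to-right pass over the dot-separated labels, dropping leading labels in the set {www,m,old,mobile} while at least two labels remain, then rejoining.
import Mathlib
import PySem

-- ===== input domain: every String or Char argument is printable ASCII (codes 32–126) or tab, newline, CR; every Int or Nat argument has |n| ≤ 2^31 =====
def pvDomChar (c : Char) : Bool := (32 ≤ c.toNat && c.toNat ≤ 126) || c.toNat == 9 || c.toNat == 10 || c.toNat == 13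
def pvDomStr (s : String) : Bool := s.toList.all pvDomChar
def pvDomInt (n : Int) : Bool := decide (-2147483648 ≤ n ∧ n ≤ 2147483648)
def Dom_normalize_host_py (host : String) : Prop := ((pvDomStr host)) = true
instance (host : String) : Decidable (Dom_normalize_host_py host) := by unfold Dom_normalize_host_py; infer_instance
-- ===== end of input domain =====

-- B replaces A's restart-on-change while loop of prefix strips by one pass over the dot-split labels (idiomatic, not claimed faster).

-- ===== PORT A =====
-- the tuple ("www.", "m.", "old.", "mobile.")
def pvPrefixes : List (List Char) :=
  [['w','w','w','.'], ['m','.'], ['o','l','d','.'], ['m','o','b','i','l','e','.']]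

-- body of the inner 'for prefix in prefixes' loop, state = (host, changed);
-- host[len(prefix):] with a nonnegative in-range start is List.drop (exact here)
def pvAStep (st : List Char × Bool) (p : List Char) : List Char × Bool :=
  if PySem.Chars.startswith st.1 p then (st.1.drop p.length, true) else st

-- termination facts for the 'while changed' loop (cited by pvALoop's decreasing_by)
theorem pvFold_len_le (ps : List (List Char)) (st : List Char × Bool) :
    ((ps.foldl pvAStep st).1).length ≤ st.1.length := by
  induction ps generalizing st with
  | nil => exact le_rfl
  | cons p ps ih =>
    rw [List.foldl_cons]
    refine (ih _).trans ?_
    unfold pvAStep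
    split
    · exact List.length_drop .. ▸ Nat.sub_le _ _
    · exact le_rfl

theorem pvFold_lt (ps : List (List Char)) (hps : ∀ p ∈ ps, p ≠ []) (st : List Char × Bool)
    (h : (ps.foldl pvAStep st).2 = true) :
    st.2 = true ∨ ((ps.foldl pvAStep st).1).length < st.1.length := by
  induction ps generalizing st with
  | nil => exact Or.inl h
  | cons p ps ih =>
    rw [List.foldl_cons] at h ⊢
    by_cases hsw : PySem.Chars.startswith st.1 p = true
    · right
      have hpre : p <+: st.1 := (PySem.Chars.startswith_iff _ _).mp hsw
      have hple : p.length ≤ st.1.length := hpre.length_le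
      have hpne : p.length ≠ 0 := by
        simpa [List.length_eq_zero_iff] using hps p (List.mem_cons_self ..)
      have hstep : pvAStep st p = (st.1.drop p.length, true) := by
        unfold pvAStep; rw [if_pos hsw]
      rw [hstep] at h ⊢
      calc ((ps.foldl pvAStep (st.1.drop p.length, true)).1).length
          ≤ (st.1.drop p.length).length := pvFold_len_le ..
        _ < st.1.length := by rw [List.length_drop]; omega
    · have hstep : pvAStep st p = st := by unfold pvAStep; rw [if_neg hsw]
      rw [hstep] at h ⊢
      exact ih (fun q hq => hps q (List.mem_cons_of_mem _ hq)) st h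

theorem pvFold_dec (s : List Char) (h : (pvPrefixes.foldl pvAStep (s, false)).2 = true) :
    ((pvPrefixes.foldl pvAStep (s, false)).1).length < s.length := by
  rcases pvFold_lt pvPrefixes (by decide) (s, false) h with h' | h'
  · exact absurd h' (by simp)
  · exact h'

-- the 'while changed:' loop (changed starts True, so the body runs at least once)
def pvALoop (s : List Char) : List Char :=
  if h : (pvPrefixes.foldl pvAStep (s, false)).2 = true then
    pvALoop (pvPrefixes.foldl pvAStep (s, false)).1
  else (pvPrefixes.foldl pvAStep (s, false)).1
termination_by s.length
decreasing_by exact pvFold_dec s h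

def normalize_host_py (host : String) : String :=
  String.mk (pvALoop (PySem.Chars.stripChars (PySem.Chars.lower host.toList) ['.']))

-- ===== PORT B =====
-- the set {"www", "m", "old", "mobile"}
def pvSkip : PySem.Set (List Char) :=
  PySem.Set.ofList [['w','w','w'], ['m'], ['o','l','d'], ['m','o','b','i','l','e']]

-- Source B's 'while len(labels) > 1 and labels[0] in skip: labels = labels[1:]'
def pvBDrop : List (List Char) → List (List Char)
  | l :: r :: rs => if pvSkip.contains l then pvBDrop (r :: rs) else l :: r :: rs
  | ls => ls

def normalize_host_py_alt (host : String) : String :=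
  String.mk (PySem.Chars.join ['.']
    (pvBDrop (PySem.Chars.splitOn (PySem.Chars.stripChars (PySem.Chars.lower host.toList) ['.']) ['.'])))

-- ===== PRECONDITION & SPEC =====
def Spec_normalize_host_py (host : String) (out : String) : Prop := out = normalize_host_py_alt host
instance (host : String) (out : String) : Decidable (Spec_normalize_host_py host out) := by unfold Spec_normalize_host_py; infer_instance

-- ===== CLAIM (what is proved, stated in full; the proofs are below) =====
def Claim_equal_normalize_host_py : Prop := ∀ (host : String), Dom_normalize_host_py host → Spec_normalize_host_py host (normalize_host_py host)

-- ===== LEMMAS AND PROOFS =====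

-- reference single-character split on '.' (what Python s.split(".") computes)
def pvSplit1 : List Char → List (List Char)
  | [] => [[]]
  | c :: r =>
    if c = '.' then [] :: pvSplit1 r
    else match pvSplit1 r with
      | [] => [[c]]
      | h :: t => (c :: h) :: t

theorem pvSplit1_ne_nil (s : List Char) : pvSplit1 s ≠ [] := by
  cases s with
  | nil => simp [pvSplit1]
  | cons c r =>
    unfold pvSplit1
    split
    · simp
    · split <;> simp

theorem pvGo_spec (l : List Char) (fuel : ℕ) (cur : List Char) (acc : List (List Char))
    (hf : l.length ≤ fuel) :
    PySem.Chars.splitOn.go ['.'] (fuel + 1) l cur acc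
      = acc.reverse ++ ((pvSplit1 l).modifyHead (cur.reverse ++ ·)) := by
  induction l generalizing fuel cur acc with
  | nil => simp [PySem.Chars.splitOn.go, pvSplit1]
  | cons c r ih =>
    obtain ⟨m, rfl⟩ : ∃ m, fuel = m + 1 := by
      cases fuel with
      | zero => simp at hf
      | succ m => exact ⟨m, rfl⟩
    have hr : r.length ≤ m := by simpa [Nat.succ_le_succ_iff] using hf
    by_cases hc : c = '.'
    · subst hc
      rw [show PySem.Chars.splitOn.go ['.'] (m + 1 + 1) ('.' :: r) cur acc
            = PySem.Chars.splitOn.go ['.'] (m + 1) r [] (cur.reverse :: acc) by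
          simp [PySem.Chars.splitOn.go, List.isPrefixOf]]
      rw [ih m [] (cur.reverse :: acc) hr]
      rcases hs : pvSplit1 r with _ | ⟨h, t⟩
      · exact absurd hs (pvSplit1_ne_nil r)
      · simp [pvSplit1, hs]
    · rw [show PySem.Chars.splitOn.go ['.'] (m + 1 + 1) (c :: r) cur acc
            = PySem.Chars.splitOn.go ['.'] (m + 1) r (c :: cur) acc by
          simp only [PySem.Chars.splitOn.go, List.isPrefixOf, Bool.and_true]
          rw [if_neg (by simp [Ne.symm hc])]]
      rw [ih m (c :: cur) acc hr]
      rcases hs : pvSplit1 r with _ | ⟨h, t⟩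
      · exact absurd hs (pvSplit1_ne_nil r)
      · simp [pvSplit1, hs, hc]

theorem pvSplitOn_eq (s : List Char) : PySem.Chars.splitOn s ['.'] = pvSplit1 s := by
  unfold PySem.Chars.splitOn
  rw [pvGo_spec s s.length [] [] le_rfl]
  rcases hs : pvSplit1 s with _ | ⟨h, t⟩
  · exact absurd hs (pvSplit1_ne_nil s)
  · simp

theorem pvJoin_split1 (s : List Char) : PySem.Chars.join ['.'] (pvSplit1 s) = s := by
  induction s with
  | nil => decide
  | cons c r ih =>
    by_cases hc : c = '.'
    · subst hc
      rcases hs : pvSplit1 r with _ | ⟨h, t⟩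
      · exact absurd hs (pvSplit1_ne_nil r)
      · rw [hs] at ih
        simp only [pvSplit1, hs]
        simpa [PySem.Chars.join, List.intercalate] using congrArg ('.' :: ·) ih
    · rcases hs : pvSplit1 r with _ | ⟨h, t⟩
      · exact absurd hs (pvSplit1_ne_nil r)
      · rw [hs] at ih
        simp only [pvSplit1, if_neg hc, hs]
        cases t with
        | nil =>
          simp [PySem.Chars.join, List.intercalate] at ih ⊢
          simp [ih]
        | cons t1 t2 =>
          simp [PySem.Chars.join, List.intercalate] at ih ⊢
          simp [ih]

theorem pvSplit1_prepend (L t : List Char) (hL : '.' ∉ L) :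
    pvSplit1 (L ++ '.' :: t) = L :: pvSplit1 t := by
  induction L with
  | nil => simp [pvSplit1]
  | cons c L' ih =>
    have hc : c ≠ '.' := fun h => hL (h ▸ List.mem_cons_self ..)
    have hL' : '.' ∉ L' := fun h => hL (List.mem_cons_of_mem _ h)
    simp only [List.cons_append, pvSplit1, if_neg hc, ih hL']

-- B's label-view of the result
def pvT (s : List Char) : List Char :=
  PySem.Chars.join ['.'] (pvBDrop (pvSplit1 s))

theorem pvT_strip (L s t : List Char) (hL : '.' ∉ L) (hmem : pvSkip.contains L = true)
    (hs : s = L ++ '.' :: t) : pvT s = pvT t := by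
  subst hs
  unfold pvT
  rw [pvSplit1_prepend L t hL]
  rcases ht : pvSplit1 t with _ | ⟨h, ts⟩
  · exact absurd ht (pvSplit1_ne_nil t)
  · rw [show pvBDrop (L :: h :: ts) = pvBDrop (h :: ts) by
      conv_lhs => rw [pvBDrop]
      rw [if_pos hmem]]

theorem pvT_step (p s : List Char) (hp : p ∈ pvPrefixes)
    (hsw : PySem.Chars.startswith s p = true) : pvT (s.drop p.length) = pvT s := by
  have hpre : p <+: s := (PySem.Chars.startswith_iff _ _).mp hsw
  obtain ⟨t, rfl⟩ := hpre
  rw [List.drop_left]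
  fin_cases hp
  · exact (pvT_strip ['w','w','w'] _ t (by decide) (by decide) rfl).symm
  · exact (pvT_strip ['m'] _ t (by decide) (by decide) rfl).symm
  · exact (pvT_strip ['o','l','d'] _ t (by decide) (by decide) rfl).symm
  · exact (pvT_strip ['m','o','b','i','l','e'] _ t (by decide) (by decide) rfl).symm

theorem pvFold_T (ps : List (List Char)) (hps : ∀ p ∈ ps, p ∈ pvPrefixes)
    (st : List Char × Bool) : pvT ((ps.foldl pvAStep st).1) = pvT st.1 := by
  induction ps generalizing st with
  | nil => rfl
  | cons p ps ih =>
    rw [List.foldl_cons]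
    by_cases hsw : PySem.Chars.startswith st.1 p = true
    · have hstep : pvAStep st p = (st.1.drop p.length, true) := by
        unfold pvAStep; rw [if_pos hsw]
      rw [hstep, ih (fun q hq => hps q (List.mem_cons_of_mem _ hq))]
      exact pvT_step p st.1 (hps p (List.mem_cons_self ..)) hsw
    · have hstep : pvAStep st p = st := by unfold pvAStep; rw [if_neg hsw]
      rw [hstep]
      exact ih (fun q hq => hps q (List.mem_cons_of_mem _ hq)) st

theorem pvFold_mono (ps : List (List Char)) (st : List Char × Bool) (h : st.2 = true) :
    (ps.foldl pvAStep st).2 = true := by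
  induction ps generalizing st with
  | nil => exact h
  | cons p ps ih =>
    rw [List.foldl_cons]
    unfold pvAStep
    split
    · exact ih _ rfl
    · exact ih _ h

theorem pvFold_id (ps : List (List Char)) (s : List Char)
    (h : (ps.foldl pvAStep (s, false)).2 = false) :
    (ps.foldl pvAStep (s, false)).1 = s ∧ ∀ p ∈ ps, PySem.Chars.startswith s p = false := by
  induction ps with
  | nil => exact ⟨rfl, by simp⟩
  | cons p ps ih =>
    rw [List.foldl_cons] at h ⊢
    by_cases hsw : PySem.Chars.startswith s p = true
    · have hstep : pvAStep (s, false) p = (s.drop p.length, true) := by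
        unfold pvAStep; rw [if_pos hsw]
      rw [hstep] at h
      exact absurd (pvFold_mono ps _ rfl) (by rw [h]; simp)
    · have hstep : pvAStep (s, false) p = (s, false) := by unfold pvAStep; rw [if_neg hsw]
      rw [hstep] at h ⊢
      obtain ⟨h1, h2⟩ := ih h
      exact ⟨h1, fun q hq => by
        rcases List.mem_cons.mp hq with rfl | hq'
        · exact eq_false_of_ne_true hsw
        · exact h2 q hq'⟩

theorem pvT_fix (s : List Char)
    (hall : ∀ p ∈ pvPrefixes, PySem.Chars.startswith s p = false) : pvT s = s := by
  unfold pvT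
  rcases hs : pvSplit1 s with _ | ⟨L, ls⟩
  · exact absurd hs (pvSplit1_ne_nil s)
  · cases ls with
    | nil =>
      have := pvJoin_split1 s
      rw [hs] at this
      rw [show pvBDrop [L] = [L] from rfl]
      exact this
    | cons r rs =>
      have hjoin := pvJoin_split1 s
      rw [hs] at hjoin
      have hcontains : pvSkip.contains L = false := by
        by_contra hcon
        have hLmem : L ∈ [['w','w','w'], ['m'], ['o','l','d'], ['m','o','b','i','l','e']] := by
          have : L ∈ pvSkip := (PySem.Set.contains_iff _ _).mp (eq_true_of_ne_false hcon)
          simpa [pvSkip, PySem.Set.mem_ofList] using this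
        have hpref : (L ++ ['.']) <+: s := by
          rw [← hjoin]
          have : PySem.Chars.join ['.'] (L :: r :: rs)
              = (L ++ ['.']) ++ PySem.Chars.join ['.'] (r :: rs) := by
            simp [PySem.Chars.join, List.intercalate]
          rw [this]
          exact List.prefix_append _ _
        have hsw : PySem.Chars.startswith s (L ++ ['.']) = true :=
          (PySem.Chars.startswith_iff _ _).mpr hpref
        fin_cases hLmem <;>
          simp_all [pvPrefixes]
      have hnot : L ∉ pvSkip := fun hmem => by
        rw [(PySem.Set.contains_iff _ _).mpr hmem] at hcontains; simp at hcontains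
      rw [show pvBDrop (L :: r :: rs) = L :: r :: rs by
        conv_lhs => rw [pvBDrop]
        rw [if_neg (by simpa using hnot)]]
      exact hjoin

theorem pvMain (s : List Char) : pvALoop s = pvT s := by
  generalize hn : s.length = n
  induction n using Nat.strong_induction_on generalizing s with
  | _ n ih =>
    rw [pvALoop]
    by_cases h : (pvPrefixes.foldl pvAStep (s, false)).2 = true
    · rw [dif_pos h]
      have hlt : ((pvPrefixes.foldl pvAStep (s, false)).1).length < n :=
        hn ▸ pvFold_dec s h
      rw [ih _ hlt _ rfl]
      exact pvFold_T pvPrefixes (by decide) (s, false)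
    · rw [dif_neg h]
      obtain ⟨h1, h2⟩ := pvFold_id pvPrefixes s (eq_false_of_ne_true h)
      rw [h1]
      exact (pvT_fix s h2).symm

-- ===== VERDICT (by name: the statement is the Claim_ definition above) =====
theorem normalize_host_py_spec : Claim_equal_normalize_host_py := by
  intro host _
  unfold Spec_normalize_host_py normalize_host_py normalize_host_py_alt
  rw [pvSplitOn_eq, pvMain]
  rfl
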